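-- pv_equiv track=rewrite | github.com/Raghavyadav17/ShellPilot | shellpilot/core/workflow.py | _group_related_commands
-- ===== SOURCE A (Python) =====
-- from typing import List, Dict, Any, Optional, Union
--
-- def _group_related_commands(commands: List[str]) -> Dict[str, List[str]]:
--     """Group related commands into logical steps"""
--     groups = {}
--     current_group = "Setup"
--
--     for cmd in commands:
--         # Categorize commands
--         if any(x in cmd for x in ['apt update', 'yum update', 'dnf update']):
--             current_group = "System Update"
--         elif any(x in cmd for x in ['apt install', 'yum install', 'dnf install']):
--             current_group = "Package Installation"
--         elif any(x in cmd for x in ['systemctl', 'service']):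
--             current_group = "Service Management"
--         elif any(x in cmd for x in ['ufw', 'iptables', 'firewall']):
--             current_group = "Firewall Configuration"
--         elif any(x in cmd for x in ['nginx', 'apache', 'httpd']):
--             current_group = "Web Server Setup"
--         elif any(x in cmd for x in ['docker', 'container']):
--             current_group = "Container Setup"
--         elif any(x in cmd for x in ['git clone', 'git']):
--             current_group = "Repository Setup"
--         elif any(x in cmd for x in ['chmod', 'chown', 'mkdir']):
--             current_group = "File System Setup"
--         else:
--             current_group = "Configuration"
--
--         if current_group not in groups:
--             groups[current_group] = []
--         groups[current_group].append(cmd)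
--
--     return groups
-- ===== SOURCE B (Python) =====
-- _PATTERNS = [
--     ['apt update', 'yum update', 'dnf update'],
--     ['apt install', 'yum install', 'dnf install'],
--     ['systemctl', 'service'],
--     ['ufw', 'iptables', 'firewall'],
--     ['nginx', 'apache', 'httpd'],
--     ['docker', 'container'],
--     ['git clone', 'git'],
--     ['chmod', 'chown', 'mkdir'],
-- ]
-- _LABELS = ['System Update', 'Package Installation', 'Service Management',
--            'Firewall Configuration', 'Web Server Setup', 'Container Setup',
--            'Repository Setup', 'File System Setup', 'Configuration']
--
--
-- def _label(cmd):
--     # index of the lowest-priority matching rule; no match -> the default label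
--     return _LABELS[min((i for i, ps in enumerate(_PATTERNS)
--                         if any(p in cmd for p in ps)),
--                        default=len(_PATTERNS))]
--
--
-- def _group_related_commands(commands):
--     # stage 1: label every command; stage 2: one bucket per distinct label,
--     # in first-appearance order, filled by filtering the labelled commands
--     labels = [_label(c) for c in commands]
--     return {L: [c for c, l in zip(commands, labels) if l == L]
--             for L in dict.fromkeys(labels)}
-- ===== Notes on version B (the rewrite author's own statement) =====
-- stated objective: simpler
-- what changed: Replaces A's single-pass mutable-dict accumulation under a 9-branch if/elif chain by a staged pipeline: labels are computed once via the minimum matching-rule index over an enumerated pattern table, and the result is a dict comprehension that builds one bucket per distinct label (first-appearance order) by filtering the zipped (command,label) list.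
import Mathlib
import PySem

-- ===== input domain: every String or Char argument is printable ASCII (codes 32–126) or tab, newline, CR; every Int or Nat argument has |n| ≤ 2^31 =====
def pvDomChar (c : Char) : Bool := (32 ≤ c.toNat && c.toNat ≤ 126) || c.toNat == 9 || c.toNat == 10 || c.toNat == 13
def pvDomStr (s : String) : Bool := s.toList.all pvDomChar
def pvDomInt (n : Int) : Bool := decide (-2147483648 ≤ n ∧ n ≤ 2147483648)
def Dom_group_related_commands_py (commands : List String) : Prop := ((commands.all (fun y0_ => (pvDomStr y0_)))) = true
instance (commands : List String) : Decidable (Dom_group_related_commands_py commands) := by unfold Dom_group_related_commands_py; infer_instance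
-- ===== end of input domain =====

-- B replaces A's single-pass mutable-dict loop under a 9-branch if/elif chain by a staged
-- pipeline: label each command via the minimum matching-rule index over an enumerated pattern
-- table, then build one bucket per distinct label by filtering (objective: simpler).


-- ===== PORT A =====
-- A's per-command dict update: `if current_group not in groups: groups[current_group] = []`
-- then `groups[current_group].append(cmd)`.
def pvDictStep (groups : PySem.Dict String (List String)) (current_group : String)
    (cmd : String) : PySem.Dict String (List String) :=
  let groups := if groups.contains current_group then groups else groups.insert current_group []
  groups.insert current_group ((groups.getD current_group []) ++ [cmd])

def group_related_commands_py (commands : List String) : List (String × List String) :=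
  let st := commands.foldl
    (fun (st : PySem.Dict String (List String) × String) cmd =>
      let current_group :=
        if ["apt update", "yum update", "dnf update"].any (fun x => PySem.Str.isIn x cmd) then "System Update"
        else if ["apt install", "yum install", "dnf install"].any (fun x => PySem.Str.isIn x cmd) then "Package Installation"
        else if ["systemctl", "service"].any (fun x => PySem.Str.isIn x cmd) then "Service Management"
        else if ["ufw", "iptables", "firewall"].any (fun x => PySem.Str.isIn x cmd) then "Firewall Configuration"
        else if ["nginx", "apache", "httpd"].any (fun x => PySem.Str.isIn x cmd) then "Web Server Setup"
        else if ["docker", "container"].any (fun x => PySem.Str.isIn x cmd) then "Container Setup"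
        else if ["git clone", "git"].any (fun x => PySem.Str.isIn x cmd) then "Repository Setup"
        else if ["chmod", "chown", "mkdir"].any (fun x => PySem.Str.isIn x cmd) then "File System Setup"
        else "Configuration"
      (pvDictStep st.1 current_group cmd, current_group))
    (PySem.Dict.empty, "Setup")
  st.1.items

-- ===== PORT B =====
def pvPatterns : List (List String) :=
  [ ["apt update", "yum update", "dnf update"],
    ["apt install", "yum install", "dnf install"],
    ["systemctl", "service"],
    ["ufw", "iptables", "firewall"],
    ["nginx", "apache", "httpd"],
    ["docker", "container"],
    ["git clone", "git"],
    ["chmod", "chown", "mkdir"] ]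

def pvLabels : List String :=
  [ "System Update", "Package Installation", "Service Management", "Firewall Configuration",
    "Web Server Setup", "Container Setup", "Repository Setup", "File System Setup",
    "Configuration" ]

-- _LABELS[min((i for i, ps in enumerate(_PATTERNS) if any(p in cmd for p in ps)), default=8)]
def pvLabel (cmd : String) : String :=
  (PySem.List.pyGet? pvLabels
    (PySem.List.minD
      (((PySem.List.enumerate pvPatterns).filter
          (fun p => p.2.any (fun q => PySem.Str.isIn q cmd))).map Prod.fst)
      (fun x => x) 8)).getD ""

def group_related_commands_py_alt (commands : List String) : List (String × List String) :=
  let labels := commands.map pvLabel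
  (PySem.List.dedup labels).map
    (fun L => (L, ((commands.zip labels).filter (fun p => p.2 == L)).map Prod.fst))

-- ===== PRECONDITION & SPEC =====
def Spec_group_related_commands_py (commands : List String) (out : List (String × List String)) : Prop := out = group_related_commands_py_alt commands
instance (commands : List String) (out : List (String × List String)) : Decidable (Spec_group_related_commands_py commands out) := by unfold Spec_group_related_commands_py; infer_instance

-- ===== CLAIM (what is proved, stated in full; the proofs are below) =====
def Claim_equal_group_related_commands_py : Prop := ∀ (commands : List String), Dom_group_related_commands_py commands → Spec_group_related_commands_py commands (group_related_commands_py commands)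

-- ===== LEMMAS AND PROOFS =====

-- proof-only intermediate: the association-list grouping step ('append cmd to the bucket of label')
def pvPush : List (String × List String) → String → String → List (String × List String)
  | [], label, cmd => [(label, [cmd])]
  | (k, v) :: t, label, cmd =>
      if k == label then (k, v ++ [cmd]) :: t else (k, v) :: pvPush t label cmd

-- the first element above a strictly larger tail is the minimum
theorem pvMin_head (a : Int) (t : List Int) (h : ∀ x ∈ t, a < x) :
    PySem.List.min? (a :: t) (fun x => x) = some a := by
  cases hm : PySem.List.min? (a :: t) (fun x => x) with
  | none => exact absurd ((PySem.List.min?_eq_none_iff (a :: t) (fun x => x)).mp hm) (by simp)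
  | some m =>
      have hmem := PySem.List.min?_mem hm
      have hmin := PySem.List.min?_isMin hm a (List.mem_cons_self ..)
      rcases List.mem_cons.mp hmem with rfl | hmt
      · rfl
      · exact absurd hmin (by have := h m hmt; omega)

-- the minimum matching index over an enumeration is the first matching index
theorem pvMinFilterEnum (rules : List (List String)) (cmd : String) :
    ∀ (s d : Int),
    PySem.List.minD
      (((PySem.List.enumerate rules s).filter
          (fun p => p.2.any (fun q => PySem.Str.isIn q cmd))).map Prod.fst)
      (fun x => x) d =
    (match List.findIdx? (fun ps => ps.any (fun q => PySem.Str.isIn q cmd)) rules with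
     | some j => s + (j : Int)
     | none => d) := by
  induction rules with
  | nil => intro s d; simp [PySem.List.enumerate_nil, PySem.List.minD, PySem.List.min?]
  | cons r rs ih =>
      intro s d
      rw [PySem.List.enumerate_cons, List.filter_cons]
      by_cases hc : (r.any fun q => PySem.Str.isIn q cmd) = true
      · simp only [hc, if_true, List.map_cons, List.findIdx?_cons]
        have hgt : ∀ x ∈ ((PySem.List.enumerate rs (s + 1)).filter
            (fun p => p.2.any (fun q => PySem.Str.isIn q cmd))).map Prod.fst, s < x := by
          intro x hx
          rcases List.mem_map.mp hx with ⟨p, hp, rfl⟩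
          have hmem := List.mem_of_mem_filter hp
          rw [PySem.List.mem_enumerate_iff] at hmem
          obtain ⟨k, hk, rfl⟩ := hmem
          dsimp only
          omega
        unfold PySem.List.minD
        rw [pvMin_head s _ hgt]
        simp
      · simp only [hc, Bool.false_eq_true, if_false, List.findIdx?_cons]
        rw [ih (s + 1)]
        cases hj : List.findIdx? (fun ps => ps.any (fun q => PySem.Str.isIn q cmd)) rs with
        | none => simp
        | some j => simp; ring

-- the if/elif chain and B's minimum-matching-index labelling agree
theorem pvLabel_eq (cmd : String) :
    (if ["apt update", "yum update", "dnf update"].any (fun x => PySem.Str.isIn x cmd) then "System Update"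
     else if ["apt install", "yum install", "dnf install"].any (fun x => PySem.Str.isIn x cmd) then "Package Installation"
     else if ["systemctl", "service"].any (fun x => PySem.Str.isIn x cmd) then "Service Management"
     else if ["ufw", "iptables", "firewall"].any (fun x => PySem.Str.isIn x cmd) then "Firewall Configuration"
     else if ["nginx", "apache", "httpd"].any (fun x => PySem.Str.isIn x cmd) then "Web Server Setup"
     else if ["docker", "container"].any (fun x => PySem.Str.isIn x cmd) then "Container Setup"
     else if ["git clone", "git"].any (fun x => PySem.Str.isIn x cmd) then "Repository Setup"
     else if ["chmod", "chown", "mkdir"].any (fun x => PySem.Str.isIn x cmd) then "File System Setup"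
     else "Configuration") = pvLabel cmd := by
  unfold pvLabel
  rw [pvMinFilterEnum]
  unfold pvPatterns pvLabels
  simp only [List.findIdx?_cons, List.findIdx?_nil]
  split_ifs <;> rfl

-- keys of pvPush
theorem pvPush_keys (l : List (String × List String)) (cg cmd : String) :
    (pvPush l cg cmd).map Prod.fst =
      if l.any (fun p => p.1 == cg) then l.map Prod.fst else l.map Prod.fst ++ [cg] := by
  induction l with
  | nil => simp [pvPush]
  | cons hd t ih =>
      obtain ⟨k, v⟩ := hd
      by_cases hk : k = cg
      · simp [pvPush, hk]
      · have hbk : (k == cg) = false := by simp [hk]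
        simp only [pvPush, hbk, Bool.false_eq_true, if_false, List.map_cons, List.any_cons,
          Bool.false_or, ih]
        split <;> rfl

-- when cg never occurs, pvPush appends at the end
theorem pvPush_of_not_mem (l : List (String × List String)) (cg cmd : String)
    (h : ∀ p ∈ l, (p.1 == cg) = false) : pvPush l cg cmd = l ++ [(cg, [cmd])] := by
  induction l with
  | nil => rfl
  | cons hd t ih =>
      have hhd := h hd (List.mem_cons_self ..)
      obtain ⟨k, v⟩ := hd
      simp only [pvPush, hhd, Bool.false_eq_true, if_false, List.cons_append]
      exact congrArg _ (ih fun p hp => h p (List.mem_cons_of_mem _ hp))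

-- when cg occurs (keys nodup), the overwrite-in-place map is pvPush
theorem pvPush_of_any (l : List (String × List String)) (cg cmd : String)
    (hnd : (l.map Prod.fst).Nodup) (hc : l.any (fun p => p.1 == cg) = true) :
    l.map (fun p => if (p.1 == cg) = true then
        (cg, ((Option.map (fun x => x.2) (List.find? (fun p => p.1 == cg) l)).getD []) ++ [cmd])
      else p) = pvPush l cg cmd := by
  induction l with
  | nil => simp at hc
  | cons hd t ih =>
      obtain ⟨k, v⟩ := hd
      simp only [List.map_cons, List.nodup_cons] at hnd
      by_cases hk : k = cg
      · subst hk
        have ht : ∀ p ∈ t, (p.1 == k) = false := by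
          intro p hp
          by_contra hne
          exact hnd.1 (List.mem_map.mpr ⟨p, hp, by simpa using hne⟩)
        rw [List.map_cons, List.find?_cons_of_pos (by simp)]
        simp only [beq_self_eq_true, if_true, Option.map_some, Option.getD_some, pvPush]
        have hid : List.map (fun p => if (p.1 == k) = true then (k, v ++ [cmd]) else p) t = t := by
          rw [List.map_congr_left (g := id) (fun p hp => by simp [ht p hp]), List.map_id]
        rw [hid]
      · have hbk : (k == cg) = false := by simp [hk]
        have hct : t.any (fun p => p.1 == cg) = true := by
          simpa [hbk] using hc
        rw [List.map_cons, List.find?_cons_of_neg (by simp [hbk])]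
        simp only [hbk, Bool.false_eq_true, if_false, pvPush, ih hnd.2 hct]

theorem pvPush_nodup (l : List (String × List String)) (cg cmd : String)
    (h : (l.map Prod.fst).Nodup) : ((pvPush l cg cmd).map Prod.fst).Nodup := by
  rw [pvPush_keys]
  split
  · exact h
  · next hany =>
      refine List.Nodup.append h (List.nodup_singleton cg) ?_
      intro x hx hx1
      simp only [List.mem_singleton] at hx1
      subst hx1
      simp only [List.mem_map] at hx
      obtain ⟨p, hp, hpx⟩ := hx
      exact hany (List.any_eq_true.mpr ⟨p, hp, by simp [hpx]⟩)

-- A's dict update equals the association-list update (on nodup keys)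
theorem pvDictStep_eq (d : PySem.Dict String (List String)) (cg cmd : String)
    (h : (d.items.map Prod.fst).Nodup) :
    (pvDictStep d cg cmd).items = pvPush d.items cg cmd := by
  obtain ⟨l⟩ := d
  replace h : (l.map Prod.fst).Nodup := h
  by_cases hc : l.any (fun p => p.1 == cg) = true
  · simp only [pvDictStep, PySem.Dict.contains, hc, if_true,
      PySem.Dict.insert, PySem.Dict.getD, PySem.Dict.get?]
    exact pvPush_of_any l cg cmd h hc
  · have hall : ∀ p ∈ l, (p.1 == cg) = false := by
      intro p hp
      by_contra hne
      exact hc (List.any_eq_true.mpr ⟨p, hp, by simpa using hne⟩)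
    have hfind : List.find? (fun p => p.1 == cg) l = none := List.find?_eq_none.mpr
      (fun p hp => by simp [hall p hp])
    simp only [pvDictStep, PySem.Dict.contains, hc, if_false,
      PySem.Dict.insert, PySem.Dict.getD, PySem.Dict.get?, Bool.false_eq_true]
    have hc2 : (l ++ [(cg, [])]).any (fun p => p.1 == cg) = true := by simp
    simp only [hc2, if_true, List.find?_append, hfind, Option.none_or, List.map_append]
    rw [pvPush_of_not_mem l cg cmd hall]
    congr 1
    · rw [List.map_congr_left (g := id) (fun p hp => by simp [hall p hp]), List.map_id]
    · simp

-- A's fold, reduced to the pvPush fold with B's labelling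
theorem pvFold_eq (cmds : List String) :
    ∀ (d : PySem.Dict String (List String)) (s : String),
      (d.items.map Prod.fst).Nodup →
      (cmds.foldl
        (fun (st : PySem.Dict String (List String) × String) cmd =>
          let current_group :=
            if ["apt update", "yum update", "dnf update"].any (fun x => PySem.Str.isIn x cmd) then "System Update"
            else if ["apt install", "yum install", "dnf install"].any (fun x => PySem.Str.isIn x cmd) then "Package Installation"
            else if ["systemctl", "service"].any (fun x => PySem.Str.isIn x cmd) then "Service Management"
            else if ["ufw", "iptables", "firewall"].any (fun x => PySem.Str.isIn x cmd) then "Firewall Configuration"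
            else if ["nginx", "apache", "httpd"].any (fun x => PySem.Str.isIn x cmd) then "Web Server Setup"
            else if ["docker", "container"].any (fun x => PySem.Str.isIn x cmd) then "Container Setup"
            else if ["git clone", "git"].any (fun x => PySem.Str.isIn x cmd) then "Repository Setup"
            else if ["chmod", "chown", "mkdir"].any (fun x => PySem.Str.isIn x cmd) then "File System Setup"
            else "Configuration"
          (pvDictStep st.1 current_group cmd, current_group)) (d, s)).1.items =
      cmds.foldl (fun g cmd => pvPush g (pvLabel cmd) cmd) d.items := by
  induction cmds with
  | nil => intro d s h; rfl
  | cons c rest ih =>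
      intro d s h
      simp only [List.foldl_cons]
      rw [pvLabel_eq c]
      have hstep := pvDictStep_eq d (pvLabel c) c h
      have hnd2 : (((pvDictStep d (pvLabel c) c).items).map Prod.fst).Nodup := by
        rw [hstep]; exact pvPush_nodup _ _ _ h
      rw [ih _ _ hnd2, hstep]

-- dedup over an appended element
theorem pvDedup_append (xs : List String) (x : String) :
    PySem.List.dedup (xs ++ [x]) =
      if x ∈ xs then PySem.List.dedup xs else PySem.List.dedup xs ++ [x] := by
  rw [PySem.List.dedup_eq_ofList, PySem.List.dedup_eq_ofList, PySem.Set.ofList_eq_foldl,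
    PySem.Set.ofList_eq_foldl, List.foldl_append, List.foldl_cons, List.foldl_nil]
  have hmem : x ∈ List.foldl PySem.Set.add [] xs ↔ x ∈ xs := by
    rw [← PySem.Set.ofList_eq_foldl]; exact PySem.Set.mem_ofList xs x
  generalize hF : List.foldl PySem.Set.add [] xs = F at hmem ⊢
  by_cases hx : x ∈ xs
  · rw [if_pos hx]
    show (if PySem.Set.contains F x = true then F else F ++ [x]) = F
    rw [if_pos (by simpa [PySem.Set.contains] using hmem.mpr hx)]
  · rw [if_neg hx]
    show (if PySem.Set.contains F x = true then F else F ++ [x]) = F ++ [x]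
    rw [if_neg (fun hc => hx (hmem.mp (by simpa [PySem.Set.contains] using hc)))]

-- grouping-by-filter, expressed for (cmd, label) pairs
def pvGB (ps : List (String × String)) : List (String × List String) :=
  (PySem.List.dedup (ps.map Prod.snd)).map
    (fun L => (L, (ps.filter (fun p => p.2 == L)).map Prod.fst))

theorem pvPush_map_keys (K : List String) (bucket : String → List String) (l c : String)
    (hnd : K.Nodup) (hl : l ∈ K) :
    pvPush (K.map (fun L => (L, bucket L))) l c =
      K.map (fun L => (L, bucket L ++ if (l == L) = true then [c] else [])) := by
  induction K with
  | nil => cases hl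
  | cons k K' ih =>
      rw [List.map_cons, List.map_cons]
      rcases List.nodup_cons.mp hnd with ⟨hk', hnd'⟩
      by_cases hk : k = l
      · subst hk
        simp only [pvPush, beq_self_eq_true, if_true]
        have : K'.map (fun L => (L, bucket L ++ if (k == L) = true then [c] else [])) =
            K'.map (fun L => (L, bucket L)) := by
          refine List.map_congr_left (fun L hL => ?_)
          have : (k == L) = false := by
            simp only [beq_eq_false_iff_ne, ne_eq]
            rintro rfl; exact hk' hL
          simp [this]
        rw [this]
      · have hbk : (k == l) = false := by simp [hk]
        have hlk : (l == k) = false := by simp [Ne.symm hk]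
        simp only [pvPush, hbk, Bool.false_eq_true, if_false, hlk, List.append_nil]
        have hl' : l ∈ K' := by
          rcases List.mem_cons.mp hl with rfl | h
          · exact absurd rfl hk
          · exact h
        rw [ih hnd' hl']

theorem pvFold_push_eq (ps : List (String × String)) :
    ps.foldl (fun g p => pvPush g p.2 p.1) [] = pvGB ps := by
  induction ps using List.reverseRecOn with
  | nil => rfl
  | append_singleton ps p ih =>
      obtain ⟨c, l⟩ := p
      rw [List.foldl_append, List.foldl_cons, List.foldl_nil, ih]
      unfold pvGB
      dsimp only [List.map_cons, List.map_nil]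
      rw [List.map_append]
      dsimp only [List.map_cons, List.map_nil]
      rw [pvDedup_append]
      by_cases hl : l ∈ ps.map Prod.snd
      · simp only [hl, if_true]
        have hmain := pvPush_map_keys (PySem.List.dedup (ps.map Prod.snd))
          (fun L => (ps.filter (fun p => p.2 == L)).map Prod.fst) l c
          (PySem.List.nodup_dedup _) ((PySem.List.mem_dedup _ _).mpr hl)
        rw [hmain]
        refine List.map_congr_left (fun L _ => ?_)
        congr 1
        by_cases he : l = L
        · subst he; simp
        · have h1 : ((c, l).2 == L) = false := by simp [he]
          simp [h1]
      · simp only [hl, if_false]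
        have hnotin : ∀ q ∈ (PySem.List.dedup (ps.map Prod.snd)).map
            (fun L => (L, (ps.filter (fun p => p.2 == L)).map Prod.fst)), (q.1 == l) = false := by
          intro q hq
          rcases List.mem_map.mp hq with ⟨L, hL, rfl⟩
          have : L ∈ ps.map Prod.snd := (PySem.List.mem_dedup _ _).mp hL
          simp only [beq_eq_false_iff_ne, ne_eq]
          rintro rfl; exact hl this
        rw [pvPush_of_not_mem _ _ _ hnotin, List.map_append]
        congr 1
        · refine List.map_congr_left (fun L hL => ?_)
          have hLl : L ≠ l := by
            rintro rfl; exact hl ((PySem.List.mem_dedup _ _).mp hL)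
          have h1 : ((c, l).2 == L) = false := by simp [Ne.symm hLl]
          simp [h1]
        · have hbl : ps.filter (fun p => p.2 == l) = [] := by
            refine List.filter_eq_nil_iff.mpr (fun p hp => ?_)
            intro h
            exact hl (List.mem_map.mpr ⟨p, hp, by simpa using h⟩)
          simp [List.filter_cons, hbl]

-- B's staged pipeline is the pvPush fold
theorem pvAlt_eq (cs : List String) :
    cs.foldl (fun g c => pvPush g (pvLabel c) c) [] = group_related_commands_py_alt cs := by
  have hzip : cs.zip (cs.map pvLabel) = cs.map (fun c => (c, pvLabel c)) := by
    induction cs with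
    | nil => rfl
    | cons c t ih => simpa using ih
  have halt : group_related_commands_py_alt cs = pvGB (cs.map (fun c => (c, pvLabel c))) := by
    show (PySem.List.dedup (cs.map pvLabel)).map
        (fun L => (L, ((cs.zip (cs.map pvLabel)).filter (fun p => p.2 == L)).map Prod.fst)) =
      pvGB (cs.map (fun c => (c, pvLabel c)))
    rw [hzip]
    unfold pvGB
    simp [List.map_map, Function.comp_def]
  have hfold : cs.foldl (fun g c => pvPush g (pvLabel c) c) [] =
      (cs.map (fun c => (c, pvLabel c))).foldl (fun g p => pvPush g p.2 p.1) [] := by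
    rw [List.foldl_map]
  rw [halt, hfold]
  exact pvFold_push_eq _

-- ===== VERDICT (by name: the statement is the Claim_ definition above) =====
theorem group_related_commands_py_spec : Claim_equal_group_related_commands_py := by
  intro commands _
  unfold Spec_group_related_commands_py group_related_commands_py
  rw [pvFold_eq commands PySem.Dict.empty "Setup" (by simp [PySem.Dict.empty])]
  exact pvAlt_eq commands
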